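-- pv_equiv track=rewrite | github.com/whytechh/Spectra | new_labels.py | name_mapping
-- ===== SOURCE A (Python) =====
-- from collections import defaultdict, deque
--
-- def name_mapping(connections):
--     already_checked = set()
--     groups = []
--
--     for name in connections:
--         if name not in already_checked:
--             group = []
--             queue = deque([name])
--             while queue:
--                 current = queue.popleft()
--                 if current not in already_checked:
--                     already_checked.add(current)
--                     group.append(current)
--                     queue.extend(connections[current] - already_checked)
--             groups.append(sorted(group))
--
--     name_map = {}
--     for group in groups:
--         main_name = group[0]
--         for name in group:
--             name_map[name] = main_name
--     return name_map
-- ===== SOURCE B (Python) =====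
-- def name_mapping(connections):
--     names = list(connections)
--     reach = {u: {u} for u in names}
--     for u in names:
--         for v in connections[u]:
--             reach[u] |= reach[v]
--     for k in names:
--         rk = reach[k]
--         for i in names:
--             if k in reach[i]:
--                 reach[i] |= rk
--     name_map = {}
--     for name in names:
--         if name in name_map:
--             continue
--         group = sorted(x for x in names if x in reach[name] and x not in name_map)
--         for member in group:
--             name_map[member] = group[0]
--     return name_map
-- ===== Notes on version B (the rewrite author's own statement) =====
-- stated objective: alternative
-- what changed: Replaces A's per-component BFS (deque, visited set, per-visit set-difference enqueue, groups list, second dict-building pass) by a Floyd-Warshall-style transitive-closure: build a reachability row per key, close it by dynamic programming over intermediate nodes, then assign each still-unassigned key's reachable unassigned nodes to their sorted minimum in one pass.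
import Mathlib
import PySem

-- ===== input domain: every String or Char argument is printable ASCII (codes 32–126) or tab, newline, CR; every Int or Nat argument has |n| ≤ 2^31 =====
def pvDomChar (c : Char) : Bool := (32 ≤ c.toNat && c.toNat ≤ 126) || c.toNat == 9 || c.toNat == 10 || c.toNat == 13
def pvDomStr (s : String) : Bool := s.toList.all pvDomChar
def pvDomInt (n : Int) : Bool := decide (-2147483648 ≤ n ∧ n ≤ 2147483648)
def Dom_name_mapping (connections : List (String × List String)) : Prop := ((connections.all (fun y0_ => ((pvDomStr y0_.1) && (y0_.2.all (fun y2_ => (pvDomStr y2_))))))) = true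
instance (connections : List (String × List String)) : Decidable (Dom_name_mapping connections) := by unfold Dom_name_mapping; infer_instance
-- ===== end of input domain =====

-- B replaces A's per-component BFS (queue + visited set + groups list + second dict-building pass)
-- by a Floyd–Warshall-style transitive closure: one reachability row per key, closed by dynamic
-- programming over intermediate nodes, then one assignment pass; objective: alternative algorithm.
-- Python set-iteration order is consumed only order-insensitively by both programs (set unions,
-- membership, sorted, min), so the ports fix an arbitrary (insertion) order.

-- ===== PORT A =====

-- the Python dict both functions receive: association list with duplicate keys collapsed,
-- first occurrence winning (the association-list-as-dict convention: lookup = first match)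
def pvToDict (conn : List (String × List String)) : PySem.Dict String (List String) :=
  conn.foldl (fun d kv => if d.contains kv.1 then d else d.insert kv.1 kv.2) PySem.Dict.empty

-- universe of all names that can ever be enqueued/reached: keys and all neighbour values
-- (used only by the termination guard of A's BFS loop)
def pvUniv (conn : List (String × List String)) : List String :=
  conn.map (·.1) ++ conn.flatMap (·.2)

-- termination helper, cited by the BFS loop's decreasing_by: marking one more element of U
-- strictly shrinks the unmarked part of U
theorem pvMarkMeasure_lt (U : List String) (s t : PySem.Set String)
    (hsub : ∀ x, x ∈ s → x ∈ t) (x : String) (hxU : x ∈ U) (hxs : x ∉ s) (hxt : x ∈ t) :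
    (U.filter (fun y => !(PySem.Set.contains t y))).length
      < (U.filter (fun y => !(PySem.Set.contains s y))).length := by
  have hmono : ∀ y, PySem.Set.contains s y = true → PySem.Set.contains t y = true :=
    fun y hy => (PySem.Set.contains_iff t y).mpr (hsub y ((PySem.Set.contains_iff s y).mp hy))
  rw [← List.countP_eq_length_filter, ← List.countP_eq_length_filter]
  induction U with
  | nil => cases hxU
  | cons a tl ih =>
    rw [List.countP_cons, List.countP_cons]
    rcases List.mem_cons.mp hxU with rfl | hxtl
    · have hct : PySem.Set.contains t x = true := (PySem.Set.contains_iff t x).mpr hxt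
      have hcs : PySem.Set.contains s x = false := by
        cases h : PySem.Set.contains s x with
        | false => rfl
        | true => exact absurd ((PySem.Set.contains_iff s x).mp h) hxs
      have hle : List.countP (fun y => !(PySem.Set.contains t y)) tl
          ≤ List.countP (fun y => !(PySem.Set.contains s y)) tl := by
        refine List.countP_mono_left ?_
        intro y _ hy
        cases h : PySem.Set.contains s y with
        | false => rfl
        | true => rw [hmono y h] at hy; cases hy
      rw [hct, hcs, if_neg (by decide), if_pos (by decide)]
      omega
    · have hlt := ih hxtl
      cases hta : PySem.Set.contains t a with
      | false =>
        have hsa : PySem.Set.contains s a = false := by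
          cases h : PySem.Set.contains s a with
          | false => rfl
          | true => rw [hmono a h] at hta; cases hta
        rw [hsa]
        omega
      | true =>
        rw [if_neg (by decide)]
        cases hsa : PySem.Set.contains s a with
        | true => rw [if_neg (by decide)]; omega
        | false => rw [if_pos (by decide)]; omega

-- connections[current] - already_checked  (a set difference, consumed only as an iterable)
def pvSetDiff (ns : List String) (checked : PySem.Set String) : List String :=
  ns.filter (fun x => !(PySem.Set.contains checked x))

-- A's BFS while-loop over a queue; the 'h : current ∈ U' branch is a totality guard only
-- (every enqueued name lies in U); the get? = none branch is where Python raises KeyError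
-- (excluded by Pre_name_mapping)
def pvBfs (d : PySem.Dict String (List String)) (U : List String)
    (checked : PySem.Set String) (group : List String) (queue : List String) :
    PySem.Set String × List String :=
  match queue with
  | [] => (checked, group)
  | current :: rest =>
    if PySem.Set.contains checked current then
      pvBfs d U checked group rest
    else
      if h : current ∈ U then
        match d.get? current with
        | some ns =>
          pvBfs d U (PySem.Set.add checked current) (group ++ [current])
            (rest ++ pvSetDiff ns (PySem.Set.add checked current))
        | none => pvBfs d U (PySem.Set.add checked current) (group ++ [current]) rest
      else (checked, group)
termination_by ((U.filter (fun y => !(PySem.Set.contains checked y))).length, queue.length)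
decreasing_by
  · apply Prod.Lex.right; simp
  · apply Prod.Lex.left
    exact pvMarkMeasure_lt U checked (PySem.Set.add checked current)
      (fun x hx => (PySem.Set.mem_add checked current x).mpr (Or.inl hx)) current h
      (fun hm => ‹¬ PySem.Set.contains checked current = true› ((PySem.Set.contains_iff checked current).mpr hm))
      ((PySem.Set.mem_add checked current current).mpr (Or.inr rfl))
  · apply Prod.Lex.left
    exact pvMarkMeasure_lt U checked (PySem.Set.add checked current)
      (fun x hx => (PySem.Set.mem_add checked current x).mpr (Or.inl hx)) current h
      (fun hm => ‹¬ PySem.Set.contains checked current = true› ((PySem.Set.contains_iff checked current).mpr hm))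
      ((PySem.Set.mem_add checked current current).mpr (Or.inr rfl))

def name_mapping (connections : List (String × List String)) : List (String × String) :=
  let d := pvToDict connections
  let U := pvUniv connections
  let st := d.keys.foldl
    (fun (st : PySem.Set String × List (List String)) name =>
      if PySem.Set.contains st.1 name then st
      else
        let r := pvBfs d U st.1 [] [name]
        (r.1, st.2 ++ [PySem.List.sorted r.2 (fun x => x)]))
    (PySem.Set.empty, [])
  let nameMap := st.2.foldl
    (fun (m : PySem.Dict String String) group =>
      match group with
      | [] => m                                  -- unreachable: every stored group is nonempty
      | mainName :: _ => group.foldl (fun m name => m.insert name mainName) m)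
    PySem.Dict.empty
  nameMap.items

-- ===== PORT B =====

-- Source B: reach = {u: {u} for u in names}, then reach[u] |= reach[v] for each neighbour v.
-- getD's defaults are totality guards: reach[u] always exists, and reach[v] exists whenever
-- the Python does not raise KeyError there (a missing v is excluded by Pre_name_mapping)
def pvReach0 (d : PySem.Dict String (List String)) : PySem.Dict String (PySem.Set String) :=
  let r0 := d.keys.foldl (fun r u => r.insert u (PySem.Set.ofList [u])) PySem.Dict.empty
  d.keys.foldl
    (fun r u =>
      (d.getD u []).foldl
        (fun r v =>
          r.insert u (PySem.Set.union (r.getD u PySem.Set.empty) (r.getD v PySem.Set.empty)))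
        r)
    r0

-- Source B's Floyd–Warshall double loop: rk is read once per outer iteration (in Python the row
-- reach[k] is only ever |=-d with itself during its own inner pass, so its value never changes)
def pvWarshall (d : PySem.Dict String (List String)) : PySem.Dict String (PySem.Set String) :=
  d.keys.foldl
    (fun r k =>
      let rk := r.getD k PySem.Set.empty
      d.keys.foldl
        (fun r i =>
          let ri := r.getD i PySem.Set.empty
          if PySem.Set.contains ri k then r.insert i (PySem.Set.union ri rk) else r)
        r)
    (pvReach0 d)

def name_mapping_alt (connections : List (String × List String)) : List (String × String) :=
  let d := pvToDict connections
  let names := d.keys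
  let reach := pvWarshall d
  let nameMap := names.foldl
    (fun (m : PySem.Dict String String) name =>
      if m.contains name then m
      else
        let group := PySem.List.sorted
          (names.filter (fun x =>
            PySem.Set.contains (reach.getD name PySem.Set.empty) x && !(m.contains x)))
          (fun x => x)
        -- name_map[member] = group[0]: the loop body never runs when group is empty,
        -- so headD's default is a totality guard only
        group.foldl (fun m member => m.insert member (group.headD "")) m)
    PySem.Dict.empty
  nameMap.items

-- ===== PRECONDITION & SPEC =====

-- Pre_ excludes exactly the inputs on which the Python A raises KeyError: some neighbour name
-- that is not a key of the dict.
def Pre_name_mapping (connections : List (String × List String)) : Prop :=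
  ∀ kv ∈ connections, ∀ v ∈ kv.2, v ∈ connections.map (·.1)
instance (connections : List (String × List String)) : Decidable (Pre_name_mapping connections) := by
  unfold Pre_name_mapping; infer_instance

def pvWitness_name_mapping : (List (String × List String)) :=
  [("b", ["a"]), ("a", ["b"]), ("c", [])]

def Spec_name_mapping (connections : List (String × List String)) (out : List (String × String)) : Prop := out = name_mapping_alt connections
instance (connections : List (String × List String)) (out : List (String × String)) : Decidable (Spec_name_mapping connections out) := by unfold Spec_name_mapping; infer_instance

-- ===== CLAIM (what is proved, stated in full; the proofs are below) =====
def Claim_equal_name_mapping : Prop := ∀ (connections : List (String × List String)), Dom_name_mapping connections → Pre_name_mapping connections → Spec_name_mapping connections (name_mapping connections)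

-- ===== LEMMAS AND PROOFS =====

-- reachability from s through neighbour lists, blocked by the set V of previously visited names
-- (characterises A's BFS groups)
inductive pvReach (d : PySem.Dict String (List String)) (V : PySem.Set String) (s : String) :
    String → Prop
  | refl : pvReach d V s s
  | step {u v : String} {ns : List String} :
      pvReach d V s u → d.get? u = some ns → v ∈ ns → v ∉ V → pvReach d V s v

-- unrestricted path from s to x whose intermediate nodes (nodes with an outgoing step other
-- than the start) satisfy K (characterises B's Warshall rows)
inductive pvPath (d : PySem.Dict String (List String)) (K : String → Prop) (s : String) :
    String → Prop
  | refl : pvPath d K s s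
  | step {u v : String} {ns : List String} :
      pvPath d K s u → (u = s ∨ K u) → d.get? u = some ns → v ∈ ns → pvPath d K s v

theorem pvPath_mono (d : PySem.Dict String (List String)) {K K' : String → Prop}
    (h : ∀ y, K y → K' y) {s x : String} (p : pvPath d K s x) : pvPath d K' s x := by
  induction p with
  | refl => exact pvPath.refl
  | step _ hu hg hv ih => exact pvPath.step ih (hu.imp id (h _)) hg hv

theorem pvPath_compose (d : PySem.Dict String (List String)) {K : String → Prop}
    {s k x : String} (p1 : pvPath d K s k) (p2 : pvPath d K k x) :
    pvPath d (fun y => y = k ∨ K y) s x := by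
  induction p2 with
  | refl => exact pvPath_mono d (fun y => Or.inr) p1
  | step _ hu hg hv ih => exact pvPath.step ih (Or.inr hu) hg hv

theorem pvPath_split (d : PySem.Dict String (List String)) {K : String → Prop}
    {s k x : String} (p : pvPath d (fun y => y = k ∨ K y) s x) :
    pvPath d K s x ∨ (pvPath d K s k ∧ pvPath d K k x) := by
  induction p with
  | refl => exact Or.inl pvPath.refl
  | @step u v ns _ hu hg hv ih =>
    rcases ih with ihp | ⟨psk, pku⟩
    · rcases hu with rfl | rfl | hKu
      · exact Or.inl (pvPath.step ihp (Or.inl rfl) hg hv)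
      · exact Or.inr ⟨ihp, pvPath.step pvPath.refl (Or.inl rfl) hg hv⟩
      · exact Or.inl (pvPath.step ihp (Or.inr hKu) hg hv)
    · rcases hu with rfl | rfl | hKu
      · exact Or.inl (pvPath.step pvPath.refl (Or.inl rfl) hg hv)
      · exact Or.inr ⟨psk, pvPath.step pvPath.refl (Or.inl rfl) hg hv⟩
      · exact Or.inr ⟨psk, pvPath.step pku (Or.inr hKu) hg hv⟩

theorem pvPath_false_iff (d : PySem.Dict String (List String)) (u x : String) :
    pvPath d (fun _ => False) u x ↔ x = u ∨ ∃ ns, d.get? u = some ns ∧ x ∈ ns := by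
  constructor
  · intro p
    induction p with
    | refl => exact Or.inl rfl
    | @step u' v ns _ hu hg hv _ =>
      rcases hu with rfl | h
      · exact Or.inr ⟨ns, hg, hv⟩
      · cases h
  · rintro (rfl | ⟨ns, hg, hv⟩)
    · exact pvPath.refl
    · exact pvPath.step pvPath.refl (Or.inl rfl) hg hv

theorem pvContains_false (S : PySem.Set String) (y : String) (h : y ∉ S) :
    PySem.Set.contains S y = false := by
  cases hc : PySem.Set.contains S y with
  | false => rfl
  | true => exact absurd ((PySem.Set.contains_iff S y).mp hc) h

-- the bridge between A's blocked reachability and B's unrestricted paths: when the blocking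
-- set V is closed under edges and the start is outside it, blocked reachability is plain
-- reachability to a target outside V
theorem pvReach_iff_path (d : PySem.Dict String (List String)) (V : PySem.Set String)
    (s : String)
    (hclosed : ∀ u ∈ V, ∀ ns, d.get? u = some ns → ∀ v ∈ ns, v ∈ V)
    (hs : s ∉ V) (x : String) :
    pvReach d V s x ↔ (pvPath d (fun y => y ∈ d.keys) s x ∧ x ∉ V) := by
  constructor
  · intro p
    induction p with
    | refl => exact ⟨pvPath.refl, hs⟩
    | @step u v ns _ hg hv hnv ih =>
      have hk : u ∈ d.keys := by
        by_contra hn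
        rw [← PySem.Dict.get?_eq_none_iff_not_mem_keys] at hn
        rw [hn] at hg
        cases hg
      exact ⟨pvPath.step ih.1 (Or.inr hk) hg hv, hnv⟩
  · rintro ⟨p, hx⟩
    induction p with
    | refl => exact pvReach.refl
    | @step u v ns pu hu hg hv ih =>
      have hunv : u ∉ V := fun huv => hx (hclosed u huv ns hg v hv)
      exact pvReach.step (ih hunv) hg hv hx

theorem pvReach_mem_keys (d : PySem.Dict String (List String)) {V : PySem.Set String}
    {k x : String} (hk : k ∈ d.keys)
    (hD2 : ∀ u ns, d.get? u = some ns → ∀ v ∈ ns, v ∈ d.keys)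
    (p : pvReach d V k x) : x ∈ d.keys := by
  induction p with
  | refl => exact hk
  | step _ hg hv _ ih => exact hD2 _ _ hg _ hv

theorem pvReach_not_in_V (d : PySem.Dict String (List String)) {V : PySem.Set String}
    {k x : String} (hk : k ∉ V) (p : pvReach d V k x) : x ∉ V := by
  cases p with
  | refl => exact hk
  | step _ _ _ h => exact h

-- ---- A's BFS loop: unfolding equations and its specification ----

theorem pvBfs_nil (d : PySem.Dict String (List String)) (U : List String)
    (checked : PySem.Set String) (group : List String) :
    pvBfs d U checked group [] = (checked, group) := by
  rw [pvBfs]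

theorem pvBfs_cons_checked (d : PySem.Dict String (List String)) (U : List String)
    (checked : PySem.Set String) (group : List String) (current : String) (rest : List String)
    (hc : PySem.Set.contains checked current = true) :
    pvBfs d U checked group (current :: rest) = pvBfs d U checked group rest := by
  rw [pvBfs]
  simp [(PySem.Set.contains_iff checked current).mp hc]

theorem pvBfs_cons_some (d : PySem.Dict String (List String)) (U : List String)
    (checked : PySem.Set String) (group : List String) (current : String) (rest : List String)
    (ns : List String) (hc : PySem.Set.contains checked current = false) (hU : current ∈ U)
    (hg : d.get? current = some ns) :
    pvBfs d U checked group (current :: rest)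
      = pvBfs d U (PySem.Set.add checked current) (group ++ [current])
          (rest ++ pvSetDiff ns (PySem.Set.add checked current)) := by
  have h1 : current ∉ checked := fun hm => by
    rw [(PySem.Set.contains_iff checked current).mpr hm] at hc; cases hc
  rw [pvBfs]
  simp [h1, hU, hg]

theorem pvBfs_cons_none (d : PySem.Dict String (List String)) (U : List String)
    (checked : PySem.Set String) (group : List String) (current : String) (rest : List String)
    (hc : PySem.Set.contains checked current = false) (hU : current ∈ U)
    (hg : d.get? current = none) :
    pvBfs d U checked group (current :: rest)
      = pvBfs d U (PySem.Set.add checked current) (group ++ [current]) rest := by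
  have h1 : current ∉ checked := fun hm => by
    rw [(PySem.Set.contains_iff checked current).mpr hm] at hc; cases hc
  rw [pvBfs]
  simp [h1, hU, hg]

theorem pvBfs_spec (d : PySem.Dict String (List String)) (U : List String)
    (V : PySem.Set String) (s : String)
    (hD : ∀ u ns, d.get? u = some ns → ∀ v ∈ ns, v ∈ U)
    (hsV : s ∉ V) :
    ∀ (checked : PySem.Set String) (group queue : List String),
      (∀ x, x ∈ checked ↔ x ∈ V ∨ x ∈ group) →
      group.Nodup →
      (∀ x ∈ group, x ∉ V ∧ pvReach d V s x) →
      (∀ x ∈ queue, x ∉ V ∧ pvReach d V s x ∧ x ∈ U) →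
      (∀ u ∈ group, ∀ ns, d.get? u = some ns → ∀ v ∈ ns, v ∉ V → (v ∈ checked ∨ v ∈ queue)) →
      (s ∈ group ∨ s ∈ queue) →
      (∀ x, x ∈ (pvBfs d U checked group queue).1 ↔ x ∈ V ∨ x ∈ (pvBfs d U checked group queue).2) ∧
      (pvBfs d U checked group queue).2.Nodup ∧
      (∀ x, x ∈ (pvBfs d U checked group queue).2 ↔ pvReach d V s x) := by
  intro checked group queue
  induction checked, group, queue using pvBfs.induct (d := d) (U := U) with
  | case1 checked group =>
    intro H1 H2 H3 _H4 H5 H7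
    rw [pvBfs_nil]
    refine ⟨H1, H2, fun x => ⟨fun hx => (H3 x hx).2, fun hr => ?_⟩⟩
    have hclosed : ∀ u ∈ group, ∀ ns, d.get? u = some ns → ∀ v ∈ ns, v ∉ V → v ∈ group := by
      intro u hu ns hg v hv hnv
      rcases H5 u hu ns hg v hv hnv with h | h
      · rcases (H1 v).mp h with h' | h'
        · exact absurd h' hnv
        · exact h'
      · cases h
    have hs : s ∈ group := by
      rcases H7 with h | h
      · exact h
      · cases h
    induction hr with
    | refl => exact hs
    | step _hu hg hv hnv ih => exact hclosed _ ih _ hg _ hv hnv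
  | case2 checked group current rest hc ih =>
    intro H1 H2 H3 H4 H5 H7
    rw [pvBfs_cons_checked d U checked group current rest hc]
    apply ih H1 H2 H3
    · exact fun x hx => H4 x (List.mem_cons_of_mem _ hx)
    · intro u hu ns hg v hv hnv
      rcases H5 u hu ns hg v hv hnv with h | h
      · exact Or.inl h
      · rcases List.mem_cons.mp h with rfl | h'
        · exact Or.inl ((PySem.Set.contains_iff checked v).mp hc)
        · exact Or.inr h'
    · rcases H7 with h | h
      · exact Or.inl h
      · rcases List.mem_cons.mp h with rfl | h'
        · rcases (H1 s).mp ((PySem.Set.contains_iff checked s).mp hc) with h'' | h''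
          · exact absurd h'' hsV
          · exact Or.inl h''
        · exact Or.inr h'
  | case3 checked group current rest hc hU ns hg ih =>
    intro H1 H2 H3 H4 H5 H7
    have hcur : current ∉ checked := fun hm => hc ((PySem.Set.contains_iff checked current).mpr hm)
    have hcurV : current ∉ V := (H4 current List.mem_cons_self).1
    have hcurR : pvReach d V s current := (H4 current List.mem_cons_self).2.1
    have hcurGrp : current ∉ group := fun hgm => hcur ((H1 current).mpr (Or.inr hgm))
    rw [pvBfs_cons_some d U checked group current rest ns (pvContains_false checked current hcur) hU hg]
    apply ih
    · intro x
      rw [PySem.Set.mem_add]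
      constructor
      · rintro (hx | rfl)
        · rcases (H1 x).mp hx with h | h
          · exact Or.inl h
          · exact Or.inr (List.mem_append.mpr (Or.inl h))
        · exact Or.inr (List.mem_append.mpr (Or.inr List.mem_cons_self))
      · rintro (hx | hx)
        · exact Or.inl ((H1 x).mpr (Or.inl hx))
        · rcases List.mem_append.mp hx with h | h
          · exact Or.inl ((H1 x).mpr (Or.inr h))
          · rcases List.mem_cons.mp h with rfl | h'
            · exact Or.inr rfl
            · cases h'
    · exact List.Nodup.append H2 (List.nodup_singleton _)
        (by simpa [List.disjoint_singleton] using hcurGrp)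
    · intro x hx
      rcases List.mem_append.mp hx with h | h
      · exact H3 x h
      · rcases List.mem_cons.mp h with rfl | h'
        · exact ⟨hcurV, hcurR⟩
        · cases h'
    · intro x hx
      rcases List.mem_append.mp hx with h | h
      · exact H4 x (List.mem_cons_of_mem _ h)
      · have hfil := List.mem_filter.mp h
        have hxns : x ∈ ns := hfil.1
        have hxnc : x ∉ PySem.Set.add checked current := by
          intro hm
          rw [(PySem.Set.contains_iff _ x).mpr hm] at hfil
          simpa using hfil.2
        have hxV : x ∉ V := fun hv =>
          hxnc ((PySem.Set.mem_add checked current x).mpr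
            (Or.inl ((H1 x).mpr (Or.inl hv))))
        exact ⟨hxV, pvReach.step hcurR hg hxns hxV, hD current ns hg x hxns⟩
    · intro u hu ns' hg' v hv hnv
      rcases List.mem_append.mp hu with h | h
      · rcases H5 u h ns' hg' v hv hnv with h' | h'
        · exact Or.inl ((PySem.Set.mem_add checked current v).mpr (Or.inl h'))
        · rcases List.mem_cons.mp h' with rfl | h''
          · exact Or.inl ((PySem.Set.mem_add checked v v).mpr (Or.inr rfl))
          · exact Or.inr (List.mem_append.mpr (Or.inl h''))
      · rcases List.mem_cons.mp h with rfl | h'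
        · rw [hg] at hg'
          cases hg'
          by_cases hvc : v ∈ PySem.Set.add checked u
          · exact Or.inl hvc
          · refine Or.inr (List.mem_append.mpr (Or.inr (List.mem_filter.mpr ⟨hv, ?_⟩)))
            rw [pvContains_false _ v hvc]
            rfl
        · cases h'
    · rcases H7 with h | h
      · exact Or.inl (List.mem_append.mpr (Or.inl h))
      · rcases List.mem_cons.mp h with rfl | h'
        · exact Or.inl (List.mem_append.mpr (Or.inr List.mem_cons_self))
        · exact Or.inr (List.mem_append.mpr (Or.inl h'))
  | case4 checked group current rest hc hU hg ih =>
    intro H1 H2 H3 H4 H5 H7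
    have hcur : current ∉ checked := fun hm => hc ((PySem.Set.contains_iff checked current).mpr hm)
    have hcurV : current ∉ V := (H4 current List.mem_cons_self).1
    have hcurR : pvReach d V s current := (H4 current List.mem_cons_self).2.1
    have hcurGrp : current ∉ group := fun hgm => hcur ((H1 current).mpr (Or.inr hgm))
    rw [pvBfs_cons_none d U checked group current rest (pvContains_false checked current hcur) hU hg]
    apply ih
    · intro x
      rw [PySem.Set.mem_add]
      constructor
      · rintro (hx | rfl)
        · rcases (H1 x).mp hx with h | h
          · exact Or.inl h
          · exact Or.inr (List.mem_append.mpr (Or.inl h))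
        · exact Or.inr (List.mem_append.mpr (Or.inr List.mem_cons_self))
      · rintro (hx | hx)
        · exact Or.inl ((H1 x).mpr (Or.inl hx))
        · rcases List.mem_append.mp hx with h | h
          · exact Or.inl ((H1 x).mpr (Or.inr h))
          · rcases List.mem_cons.mp h with rfl | h'
            · exact Or.inr rfl
            · cases h'
    · exact List.Nodup.append H2 (List.nodup_singleton _)
        (by simpa [List.disjoint_singleton] using hcurGrp)
    · intro x hx
      rcases List.mem_append.mp hx with h | h
      · exact H3 x h
      · rcases List.mem_cons.mp h with rfl | h'
        · exact ⟨hcurV, hcurR⟩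
        · cases h'
    · exact fun x hx => H4 x (List.mem_cons_of_mem _ hx)
    · intro u hu ns' hg' v hv hnv
      rcases List.mem_append.mp hu with h | h
      · rcases H5 u h ns' hg' v hv hnv with h' | h'
        · exact Or.inl ((PySem.Set.mem_add checked current v).mpr (Or.inl h'))
        · rcases List.mem_cons.mp h' with rfl | h''
          · exact Or.inl ((PySem.Set.mem_add checked v v).mpr (Or.inr rfl))
          · exact Or.inr h''
      · rcases List.mem_cons.mp h with rfl | h'
        · rw [hg] at hg'
          cases hg'
        · cases h'
    · rcases H7 with h | h
      · exact Or.inl (List.mem_append.mpr (Or.inl h))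
      · rcases List.mem_cons.mp h with rfl | h'
        · exact Or.inl (List.mem_append.mpr (Or.inr List.mem_cons_self))
        · exact Or.inr h'
  | case5 checked group current rest _hc hU =>
    intro _H1 _H2 _H3 H4 _H5 _H7
    exact absurd (H4 current List.mem_cons_self).2.2 hU

-- ---- pvToDict facts ----

theorem pvFoldInsert_items_sub (l : List (String × List String)) :
    ∀ (d : PySem.Dict String (List String)) (p : String × List String),
      p ∈ (l.foldl (fun d kv => if d.contains kv.1 then d else d.insert kv.1 kv.2) d).items →
        p ∈ l ∨ p ∈ d.items := by
  induction l with
  | nil => intro d p hp; exact Or.inr hp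
  | cons kv tl ih =>
    intro d p hp
    simp only [List.foldl_cons] at hp
    by_cases hc : d.contains kv.1 = true
    · rw [if_pos hc] at hp
      rcases ih _ p hp with h | h
      · exact Or.inl (List.mem_cons_of_mem _ h)
      · exact Or.inr h
    · rw [if_neg hc] at hp
      rcases ih _ p hp with h | h
      · exact Or.inl (List.mem_cons_of_mem _ h)
      · rcases (PySem.Dict.mem_items_insert d kv.1 kv.2 p).mp h with h | ⟨h, _⟩
        · exact Or.inl (by simp [h])
        · exact Or.inr h

theorem pvToDict_items_sub (conn : List (String × List String)) :
    ∀ p ∈ (pvToDict conn).items, p ∈ conn := by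
  intro p hp
  rcases pvFoldInsert_items_sub conn PySem.Dict.empty p hp with h | h
  · exact h
  · simp [PySem.Dict.empty] at h

theorem pvToDict_hD (conn : List (String × List String)) :
    ∀ u ns, (pvToDict conn).get? u = some ns → ∀ v ∈ ns, v ∈ pvUniv conn := by
  intro u ns hg v hv
  have hmem := pvToDict_items_sub conn (u, ns) (PySem.Dict.mem_items_of_get?_eq_some _ hg)
  exact List.mem_append.mpr (Or.inr (List.mem_flatMap.mpr ⟨(u, ns), hmem, hv⟩))

theorem pvToDict_hK (conn : List (String × List String)) :
    ∀ k ∈ (pvToDict conn).keys, k ∈ pvUniv conn := by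
  intro k hk
  simp only [PySem.Dict.keys, List.mem_map] at hk
  obtain ⟨p, hp, rfl⟩ := hk
  exact List.mem_append.mpr (Or.inl (List.mem_map.mpr ⟨p, pvToDict_items_sub conn p hp, rfl⟩))

theorem pvFoldInsert_contains (l : List (String × List String)) :
    ∀ (d : PySem.Dict String (List String)) (x : String),
      ((l.foldl (fun d kv => if d.contains kv.1 then d else d.insert kv.1 kv.2) d).contains x = true)
        ↔ (x ∈ l.map (·.1) ∨ d.contains x = true) := by
  induction l with
  | nil => intro d x; simp
  | cons kv tl ih =>
    intro d x
    simp only [List.foldl_cons, List.map_cons, List.mem_cons]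
    by_cases hc : d.contains kv.1 = true
    · rw [if_pos hc, ih]
      constructor
      · rintro (h | h)
        · exact Or.inl (Or.inr h)
        · exact Or.inr h
      · rintro ((rfl | h) | h)
        · exact Or.inr hc
        · exact Or.inl h
        · exact Or.inr h
    · rw [if_neg hc, ih]
      constructor
      · rintro (h | h)
        · exact Or.inl (Or.inr h)
        · rw [PySem.Dict.contains_insert] at h
          rcases Bool.or_eq_true_iff.mp h with h' | h'
          · exact Or.inl (Or.inl (by simpa using h'))
          · exact Or.inr h'
      · rintro ((rfl | h) | h)
        · exact Or.inr (by rw [PySem.Dict.contains_insert]; simp)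
        · exact Or.inl h
        · exact Or.inr (by rw [PySem.Dict.contains_insert]; simp [h])

theorem pvToDict_mem_keys (conn : List (String × List String)) (x : String) :
    x ∈ (pvToDict conn).keys ↔ x ∈ conn.map (·.1) := by
  rw [← PySem.Dict.contains_iff_mem_keys, pvToDict, pvFoldInsert_contains]
  simp [PySem.Dict.contains_empty]

theorem pvToDict_keys_nodup (conn : List (String × List String)) :
    (pvToDict conn).keys.Nodup := by
  rw [pvToDict]
  generalize hd : PySem.Dict.empty = d0
  have h0 : (d0 : PySem.Dict String (List String)).keys.Nodup := by
    rw [← hd]; exact PySem.Dict.nodup_keys_empty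
  clear hd
  induction conn generalizing d0 with
  | nil => exact h0
  | cons kv tl ih =>
    simp only [List.foldl_cons]
    by_cases hc : d0.contains kv.1 = true
    · rw [if_pos hc]; exact ih _ h0
    · rw [if_neg hc]; exact ih _ (PySem.Dict.nodup_keys_insert _ _ _ h0)

theorem pvToDict_hD2 (conn : List (String × List String)) (hpre : Pre_name_mapping conn) :
    ∀ u ns, (pvToDict conn).get? u = some ns → ∀ v ∈ ns, v ∈ (pvToDict conn).keys := by
  intro u ns hg v hv
  have hmem := pvToDict_items_sub conn (u, ns) (PySem.Dict.mem_items_of_get?_eq_some _ hg)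
  exact (pvToDict_mem_keys conn v).mpr (hpre (u, ns) hmem v hv)

-- ---- Warshall rows ----

theorem pvRowLookup (d : PySem.Dict String (List String)) (u : String) (hu : u ∈ d.keys) :
    d.get? u = some (d.getD u []) := by
  have hc : d.contains u = true := (PySem.Dict.contains_iff_mem_keys d u).mpr hu
  rw [PySem.Dict.contains_eq_isSome_get?] at hc
  cases hgi : d.get? u with
  | none => rw [hgi] at hc; cases hc
  | some ns => rw [PySem.Dict.getD_eq_get?_getD, hgi]; rfl

theorem pvReach0_base (d : PySem.Dict String (List String)) (hnd : d.keys.Nodup) :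
    ((d.keys.foldl (fun r u => r.insert u (PySem.Set.ofList [u]))
        (PySem.Dict.empty : PySem.Dict String (PySem.Set String))).keys = d.keys) ∧
    (∀ i ∈ d.keys,
      (d.keys.foldl (fun r u => r.insert u (PySem.Set.ofList [u]))
        (PySem.Dict.empty : PySem.Dict String (PySem.Set String))).getD i PySem.Set.empty
        = PySem.Set.ofList [i]) := by
  have hfresh : ∀ a ∈ d.keys,
      (PySem.Dict.empty : PySem.Dict String (PySem.Set String)).contains a = false := by
    intro a _; exact PySem.Dict.contains_empty a
  have hmap : (d.keys.map (fun a => a)).Nodup := by simpa using hnd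
  have hitems : (d.keys.foldl (fun r u => r.insert u (PySem.Set.ofList [u]))
      (PySem.Dict.empty : PySem.Dict String (PySem.Set String))).items
      = (PySem.Dict.empty : PySem.Dict String (PySem.Set String)).items
        ++ d.keys.map (fun u => (u, PySem.Set.ofList [u])) :=
    PySem.Dict.items_foldl_insert_fresh d.keys (fun a => a)
      (fun u => PySem.Set.ofList [u]) PySem.Dict.empty hfresh hmap
  have hkeys : (d.keys.foldl (fun r u => r.insert u (PySem.Set.ofList [u]))
      (PySem.Dict.empty : PySem.Dict String (PySem.Set String))).keys = d.keys := by
    revert hitems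
    generalize d.keys = ks
    intro hitems
    simp only [PySem.Dict.keys, hitems]
    simp [PySem.Dict.empty, Function.comp_def]
  refine ⟨hkeys, fun i hi => ?_⟩
  have hknd : (d.keys.foldl (fun r u => r.insert u (PySem.Set.ofList [u]))
      (PySem.Dict.empty : PySem.Dict String (PySem.Set String))).keys.Nodup := by
    rw [hkeys]; exact hnd
  refine PySem.Dict.getD_of_mem_items _ ?_ hknd _
  rw [hitems]
  simp only [PySem.Dict.empty, List.nil_append]
  exact List.mem_map.mpr ⟨i, hi, rfl⟩

-- the neighbour-absorbing inner loop of the initialisation: reach[u] |= reach[v]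
theorem pvInit_inner (d : PySem.Dict String (List String)) (u : String) (hu : u ∈ d.keys)
    (hedge : ∀ v, v ∈ d.getD u [] → pvPath d (fun y => y ∈ d.keys) u v) :
    ∀ (vs : List String), (∀ v ∈ vs, v ∈ d.getD u []) → (∀ v ∈ vs, v ∈ d.keys) →
    ∀ (r : PySem.Dict String (PySem.Set String)),
      r.keys = d.keys →
      (∀ w ∈ d.keys, w ∈ r.getD w PySem.Set.empty) →
      (∀ w ∈ d.keys, ∀ x ∈ r.getD w PySem.Set.empty, pvPath d (fun y => y ∈ d.keys) w x) →
      (let r' := vs.foldl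
          (fun r v =>
            r.insert u (PySem.Set.union (r.getD u PySem.Set.empty) (r.getD v PySem.Set.empty)))
          r
       r'.keys = d.keys ∧
       (∀ w ∈ d.keys, w ∈ r'.getD w PySem.Set.empty) ∧
       (∀ w ∈ d.keys, ∀ x ∈ r'.getD w PySem.Set.empty, pvPath d (fun y => y ∈ d.keys) w x) ∧
       (∀ v ∈ vs, v ∈ r'.getD u PySem.Set.empty) ∧
       (∀ w, w ≠ u → r'.getD w PySem.Set.empty = r.getD w PySem.Set.empty) ∧
       (∀ x ∈ r.getD u PySem.Set.empty, x ∈ r'.getD u PySem.Set.empty)) := by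
  intro vs
  induction vs with
  | nil =>
    intro _ _ r hk hself hsound
    exact ⟨hk, hself, hsound, fun v hv => absurd hv (List.not_mem_nil),
      fun w _ => rfl, fun x hx => hx⟩
  | cons v tl ih =>
    intro hvs hvk r hk hself hsound
    have hvadj : v ∈ d.getD u [] := hvs v List.mem_cons_self
    have hvkey : v ∈ d.keys := hvk v List.mem_cons_self
    simp only [List.foldl_cons]
    set r2 := r.insert u (PySem.Set.union (r.getD u PySem.Set.empty) (r.getD v PySem.Set.empty))
      with hr2
    have hk2 : r2.keys = d.keys := by
      rw [hr2, PySem.Dict.keys_insert_of_contains r _ (by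
        rw [PySem.Dict.contains_iff_mem_keys, hk]; exact hu), hk]
    have hrow2u : r2.getD u PySem.Set.empty
        = PySem.Set.union (r.getD u PySem.Set.empty) (r.getD v PySem.Set.empty) := by
      rw [hr2, PySem.Dict.getD_insert, if_pos rfl]
    have hrow2w : ∀ w, w ≠ u → r2.getD w PySem.Set.empty = r.getD w PySem.Set.empty := by
      intro w hw
      rw [hr2, PySem.Dict.getD_insert, if_neg hw]
    have hself2 : ∀ w ∈ d.keys, w ∈ r2.getD w PySem.Set.empty := by
      intro w hw
      by_cases hwu : w = u
      · subst hwu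
        rw [hrow2u, PySem.Set.mem_union]
        exact Or.inl (hself w hw)
      · rw [hrow2w w hwu]; exact hself w hw
    have hsound2 : ∀ w ∈ d.keys, ∀ x ∈ r2.getD w PySem.Set.empty,
        pvPath d (fun y => y ∈ d.keys) w x := by
      intro w hw x hx
      by_cases hwu : w = u
      · subst hwu
        rw [hrow2u, PySem.Set.mem_union] at hx
        rcases hx with hx | hx
        · exact hsound w hw x hx
        · have hvx : pvPath d (fun y => y ∈ d.keys) v x := hsound v hvkey x hx
          have huv : pvPath d (fun y => y ∈ d.keys) w v := hedge v hvadj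
          exact pvPath_mono d (fun y hy => by
            rcases hy with rfl | hy
            · exact hvkey
            · exact hy) (pvPath_compose d huv hvx)
      · rw [hrow2w w hwu] at hx
        exact hsound w hw x hx
    obtain ⟨C1, C2, C3, C4, C5, C6⟩ := ih (fun v' hv' => hvs v' (List.mem_cons_of_mem _ hv'))
      (fun v' hv' => hvk v' (List.mem_cons_of_mem _ hv')) r2 hk2 hself2 hsound2
    refine ⟨C1, C2, C3, ?_, ?_, ?_⟩
    · intro v' hv'
      rcases List.mem_cons.mp hv' with rfl | hv'
      · apply C6
        rw [hrow2u, PySem.Set.mem_union]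
        exact Or.inr (hself v' hvkey)
      · exact C4 v' hv'
    · intro w hw
      rw [C5 w hw, hrow2w w hw]
    · intro x hx
      apply C6
      rw [hrow2u, PySem.Set.mem_union]
      exact Or.inl hx

theorem pvReach0_spec (d : PySem.Dict String (List String)) (hnd : d.keys.Nodup)
    (hD2 : ∀ u ns, d.get? u = some ns → ∀ v ∈ ns, v ∈ d.keys) :
    ((pvReach0 d).keys = d.keys) ∧
    (∀ u ∈ d.keys, u ∈ (pvReach0 d).getD u PySem.Set.empty) ∧
    (∀ u ∈ d.keys, ∀ x ∈ (pvReach0 d).getD u PySem.Set.empty,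
      pvPath d (fun y => y ∈ d.keys) u x) ∧
    (∀ u ∈ d.keys, ∀ v ∈ d.getD u [], v ∈ (pvReach0 d).getD u PySem.Set.empty) := by
  obtain ⟨hk0, hrow0⟩ := pvReach0_base d hnd
  -- the outer initialisation fold, over any suffix of distinct keys
  have main : ∀ (l : List String), l.Nodup → (∀ u ∈ l, u ∈ d.keys) →
      ∀ (r : PySem.Dict String (PySem.Set String)),
        r.keys = d.keys →
        (∀ w ∈ d.keys, w ∈ r.getD w PySem.Set.empty) →
        (∀ w ∈ d.keys, ∀ x ∈ r.getD w PySem.Set.empty, pvPath d (fun y => y ∈ d.keys) w x) →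
        (let r' := l.foldl
            (fun r u =>
              (d.getD u []).foldl
                (fun r v =>
                  r.insert u (PySem.Set.union (r.getD u PySem.Set.empty) (r.getD v PySem.Set.empty)))
                r)
            r
         r'.keys = d.keys ∧
         (∀ w ∈ d.keys, w ∈ r'.getD w PySem.Set.empty) ∧
         (∀ w ∈ d.keys, ∀ x ∈ r'.getD w PySem.Set.empty, pvPath d (fun y => y ∈ d.keys) w x) ∧
         (∀ u ∈ l, ∀ v ∈ d.getD u [], v ∈ r'.getD u PySem.Set.empty) ∧
         (∀ w, w ∉ l → r'.getD w PySem.Set.empty = r.getD w PySem.Set.empty)) := by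
    intro l
    induction l with
    | nil =>
      intro _ _ r hk hself hsound
      exact ⟨hk, hself, hsound, fun u hu => absurd hu (List.not_mem_nil), fun w _ => rfl⟩
    | cons u tl ihl =>
      intro hndl hsub r hk hself hsound
      have hukey : u ∈ d.keys := hsub u List.mem_cons_self
      have hutl : u ∉ tl := (List.nodup_cons.mp hndl).1
      have hedge : ∀ v, v ∈ d.getD u [] → pvPath d (fun y => y ∈ d.keys) u v := by
        intro v hv
        exact pvPath.step pvPath.refl (Or.inl rfl) (pvRowLookup d u hukey) hv
      have hvk : ∀ v ∈ d.getD u [], v ∈ d.keys := by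
        intro v hv
        exact hD2 u (d.getD u []) (pvRowLookup d u hukey) v hv
      simp only [List.foldl_cons]
      obtain ⟨B1, B2, B3, B4, B5, _B6⟩ := pvInit_inner d u hukey hedge (d.getD u [])
        (fun v hv => hv) hvk r hk hself hsound
      obtain ⟨C1, C2, C3, C4, C5⟩ := ihl (List.nodup_cons.mp hndl).2
        (fun v hv => hsub v (List.mem_cons_of_mem _ hv)) _ B1 B2 B3
      refine ⟨C1, C2, C3, ?_, ?_⟩
      · intro u' hu' v hv
        rcases List.mem_cons.mp hu' with rfl | hu'
        · rw [C5 u' hutl]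
          exact B4 v hv
        · exact C4 u' hu' v hv
      · intro w hw
        rw [C5 w (fun h => hw (List.mem_cons_of_mem _ h)),
          B5 w (fun he => hw (he ▸ List.mem_cons_self))]
  obtain ⟨D1, D2, D3, D4, _⟩ := main d.keys hnd (fun u hu => hu) _ hk0
    (by
      intro w hw
      rw [hrow0 w hw, PySem.Set.mem_ofList]
      exact List.mem_singleton.mpr rfl)
    (by
      intro w hw x hx
      rw [hrow0 w hw, PySem.Set.mem_ofList, List.mem_singleton] at hx
      subst hx
      exact pvPath.refl)
  exact ⟨D1, D2, D3, fun u hu v hv => D4 u hu v hv⟩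

-- the Warshall inner loop for one intermediate node k: rows of processed i absorb paths via k
theorem pvWarshall_inner (d : PySem.Dict String (List String)) (K : String → Prop)
    (k : String) (hkk : k ∈ d.keys) (S : PySem.Set String)
    (hSlow : ∀ x, pvPath d K k x → x ∈ S)
    (hSup : ∀ x ∈ S, pvPath d (fun y => y ∈ d.keys) k x) :
    ∀ (l : List String), l.Nodup → (∀ i ∈ l, i ∈ d.keys) →
    ∀ (r : PySem.Dict String (PySem.Set String)),
      r.keys = d.keys →
      (∀ i ∈ l, ∀ x, pvPath d K i x → x ∈ r.getD i PySem.Set.empty) →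
      (∀ i ∈ l, ∀ x ∈ r.getD i PySem.Set.empty, pvPath d (fun y => y ∈ d.keys) i x) →
      (let r' := l.foldl
          (fun r i =>
            let ri := r.getD i PySem.Set.empty
            if PySem.Set.contains ri k then r.insert i (PySem.Set.union ri S) else r) r
       r'.keys = d.keys ∧
       (∀ i ∈ l, ∀ x, pvPath d (fun y => y = k ∨ K y) i x → x ∈ r'.getD i PySem.Set.empty) ∧
       (∀ i ∈ l, ∀ x ∈ r'.getD i PySem.Set.empty, pvPath d (fun y => y ∈ d.keys) i x) ∧
       (∀ i, i ∉ l → r'.getD i PySem.Set.empty = r.getD i PySem.Set.empty)) := by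
  intro l
  induction l with
  | nil =>
    intro _ _ r hk _ _
    exact ⟨hk, fun i hi => absurd hi (List.not_mem_nil),
      fun i hi => absurd hi (List.not_mem_nil), fun i _ => rfl⟩
  | cons i tl ih =>
    intro hnd hsub r hkeys hlow hup
    have hitl : i ∉ tl := (List.nodup_cons.mp hnd).1
    have hik : i ∈ d.keys := hsub i List.mem_cons_self
    have hlowi := hlow i List.mem_cons_self
    have hupi := hup i List.mem_cons_self
    simp only [List.foldl_cons]
    set ri := r.getD i PySem.Set.empty with hri_def
    have hnew : ∀ (r2 : PySem.Dict String (PySem.Set String)),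
        r2.keys = d.keys →
        (∀ x, pvPath d (fun y => y = k ∨ K y) i x → x ∈ r2.getD i PySem.Set.empty) →
        (∀ x ∈ r2.getD i PySem.Set.empty, pvPath d (fun y => y ∈ d.keys) i x) →
        (∀ j, j ≠ i → r2.getD j PySem.Set.empty = r.getD j PySem.Set.empty) →
        (let r' := tl.foldl
            (fun r i =>
              let ri := r.getD i PySem.Set.empty
              if PySem.Set.contains ri k then r.insert i (PySem.Set.union ri S) else r) r2
         r'.keys = d.keys ∧
         (∀ j ∈ i :: tl, ∀ x, pvPath d (fun y => y = k ∨ K y) j x → x ∈ r'.getD j PySem.Set.empty) ∧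
         (∀ j ∈ i :: tl, ∀ x ∈ r'.getD j PySem.Set.empty, pvPath d (fun y => y ∈ d.keys) j x) ∧
         (∀ j, j ∉ i :: tl → r'.getD j PySem.Set.empty = r.getD j PySem.Set.empty)) := by
      intro r2 hk2 hlow2 hup2 hother2
      obtain ⟨C1, C2, C3, C4⟩ := ih (List.nodup_cons.mp hnd).2
        (fun j hj => hsub j (List.mem_cons_of_mem _ hj)) r2 hk2
        (fun j hj x hx => by
          rw [hother2 j (fun he => hitl (he ▸ hj))]
          exact hlow j (List.mem_cons_of_mem _ hj) x hx)
        (fun j hj x hx => by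
          rw [hother2 j (fun he => hitl (he ▸ hj))] at hx
          exact hup j (List.mem_cons_of_mem _ hj) x hx)
      refine ⟨C1, ?_, ?_, ?_⟩
      · intro j hj x hx
        rcases List.mem_cons.mp hj with rfl | hj'
        · rw [C4 j hitl]; exact hlow2 x hx
        · exact C2 j hj' x hx
      · intro j hj x hx
        rcases List.mem_cons.mp hj with rfl | hj'
        · rw [C4 j hitl] at hx; exact hup2 x hx
        · exact C3 j hj' x hx
      · intro j hj
        rw [C4 j (fun h => hj (List.mem_cons_of_mem _ h)),
          hother2 j (fun he => hj (he ▸ List.mem_cons_self))]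
    by_cases hc : PySem.Set.contains ri k = true
    · have hkri : k ∈ ri := (PySem.Set.contains_iff ri k).mp hc
      simp only [if_pos hc]
      apply hnew
      · rw [show (r.insert i (PySem.Set.union ri S)).keys = r.keys from
          PySem.Dict.keys_insert_of_contains r _ (by
            rw [PySem.Dict.contains_iff_mem_keys, hkeys]; exact hik), hkeys]
      · intro x hx
        rw [PySem.Dict.getD_insert, if_pos rfl, PySem.Set.mem_union]
        rcases pvPath_split d hx with h | ⟨_, h2⟩
        · exact Or.inl (hlowi x h)
        · exact Or.inr (hSlow x h2)
      · intro x hx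
        rw [PySem.Dict.getD_insert, if_pos rfl, PySem.Set.mem_union] at hx
        rcases hx with hx | hx
        · exact hupi x hx
        · exact pvPath_mono d (fun y hy => by
            rcases hy with rfl | hy
            · exact hkk
            · exact hy) (pvPath_compose d (hupi k hkri) (hSup x hx))
      · intro j hj
        rw [PySem.Dict.getD_insert, if_neg hj]
    · rw [if_neg hc]
      apply hnew r hkeys
      · intro x hx
        rcases pvPath_split d hx with h | ⟨h1, _⟩
        · exact hlowi x h
        · exact absurd ((PySem.Set.contains_iff ri k).mpr (hlowi k h1)) (by simpa using hc)
      · exact hupi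
      · intro j _; rfl

theorem pvWarshall_outer (d : PySem.Dict String (List String)) (hdnd : d.keys.Nodup) :
    ∀ (l : List String), (∀ i ∈ l, i ∈ d.keys) →
    ∀ (K : String → Prop) (r : PySem.Dict String (PySem.Set String)),
      r.keys = d.keys →
      (∀ i ∈ d.keys, ∀ x, pvPath d K i x → x ∈ r.getD i PySem.Set.empty) →
      (∀ i ∈ d.keys, ∀ x ∈ r.getD i PySem.Set.empty, pvPath d (fun y => y ∈ d.keys) i x) →
      (let r' := l.foldl
          (fun r k =>
            let rk := r.getD k PySem.Set.empty
            d.keys.foldl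
              (fun r i =>
                let ri := r.getD i PySem.Set.empty
                if PySem.Set.contains ri k then r.insert i (PySem.Set.union ri rk) else r)
              r) r
       r'.keys = d.keys ∧
       (∀ i ∈ d.keys, ∀ x, pvPath d (fun y => y ∈ l ∨ K y) i x → x ∈ r'.getD i PySem.Set.empty) ∧
       (∀ i ∈ d.keys, ∀ x ∈ r'.getD i PySem.Set.empty, pvPath d (fun y => y ∈ d.keys) i x)) := by
  intro l
  induction l with
  | nil =>
    intro _ K r hk hlow hup
    refine ⟨by simpa using hk, fun i hi x hx => ?_, by simpa using hup⟩
    simp only [List.foldl_nil]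
    exact hlow i hi x (pvPath_mono d (fun y hy => by
      rcases hy with hy | hy
      · cases hy
      · exact hy) hx)
  | cons k tl ih =>
    intro hsub K r hk hlow hup
    have hkk : k ∈ d.keys := hsub k List.mem_cons_self
    simp only [List.foldl_cons]
    obtain ⟨C1, C2, C3, _⟩ := pvWarshall_inner d K k hkk (r.getD k PySem.Set.empty)
      (hlow k hkk) (hup k hkk) d.keys hdnd (fun i hi => hi) r hk
      (fun i hi => hlow i hi) (fun i hi => hup i hi)
    obtain ⟨D1, D2, D3⟩ := ih (fun i hi => hsub i (List.mem_cons_of_mem _ hi))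
      (fun y => y = k ∨ K y) _ C1 C2 C3
    refine ⟨D1, fun i hi x hx => ?_, D3⟩
    apply D2 i hi x
    refine pvPath_mono d (fun y hy => ?_) hx
    rcases hy with hy | hy
    · rcases List.mem_cons.mp hy with rfl | hy'
      · exact Or.inr (Or.inl rfl)
      · exact Or.inl hy'
    · exact Or.inr (Or.inr hy)

theorem pvWarshall_spec (d : PySem.Dict String (List String)) (hdnd : d.keys.Nodup)
    (hD2 : ∀ u ns, d.get? u = some ns → ∀ v ∈ ns, v ∈ d.keys) :
    ∀ i ∈ d.keys, ∀ x,
      x ∈ (pvWarshall d).getD i PySem.Set.empty ↔ pvPath d (fun y => y ∈ d.keys) i x := by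
  obtain ⟨hk0, hself0, hsound0, hadj0⟩ := pvReach0_spec d hdnd hD2
  obtain ⟨_, hlow, hup⟩ := pvWarshall_outer d hdnd d.keys (fun i hi => hi) (fun _ => False)
    (pvReach0 d) hk0
    (by
      intro i hi x hx
      rcases (pvPath_false_iff d i x).mp hx with hxi | ⟨ns, hg, hv⟩
      · exact hxi ▸ hself0 i hi
      · have hg' := pvRowLookup d i hi
        rw [hg] at hg'
        injection hg' with hns
        exact hadj0 i hi x (hns ▸ hv))
    hsound0
  intro i hi x
  constructor
  · intro hx
    exact hup i hi x hx
  · intro hx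
    exact hlow i hi x (pvPath_mono d (fun y hy => Or.inl hy) hx)

-- ---- rendering of A's name_map building ----

-- A's final dict-building double loop appends, per group, one entry per member
def pvRender (groups : List (List String)) : List (String × String) :=
  groups.flatMap (fun g =>
    match g with
    | [] => []
    | m :: _ => g.map (fun n => (n, m)))

theorem pvBuildMap (groups : List (List String)) :
    ∀ (m : PySem.Dict String String),
      (groups.flatMap id).Nodup →
      m.keys.Nodup →
      (∀ x ∈ groups.flatMap id, x ∉ m.keys) →
      (groups.foldl
        (fun m g =>
          match g with
          | [] => m
          | mainName :: _ => g.foldl (fun m name => m.insert name mainName) m) m).items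
        = m.items ++ pvRender groups := by
  induction groups with
  | nil => intro m _ _ _; simp [pvRender]
  | cons g rest ih =>
    intro m hnd hk hdisj
    simp only [List.flatMap_cons, id_eq, List.nodup_append] at hnd
    cases g with
    | nil =>
      simp only [List.foldl_cons]
      rw [ih m hnd.2.1 hk (fun x hx => hdisj x
        (by simp only [List.flatMap_cons, id_eq]; exact List.mem_append.mpr (Or.inr hx)))]
      simp [pvRender]
    | cons m0 gtl =>
      simp only [List.foldl_cons]
      have hfresh : ∀ a ∈ m0 :: gtl, m.contains a = false := by
        intro a ha
        have hnk : a ∉ m.keys := hdisj a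
          (by simp only [List.flatMap_cons, id_eq]; exact List.mem_append.mpr (Or.inl ha))
        cases hc : m.contains a with
        | false => rfl
        | true => exact absurd ((PySem.Dict.contains_iff_mem_keys m a).mp hc) hnk
      have hmap : (List.map (fun a => a) (m0 :: gtl)).Nodup := by simpa using hnd.1
      have hitems : ((m0 :: gtl).foldl (fun m name => m.insert name m0) m).items
          = m.items ++ (m0 :: gtl).map (fun a => (a, m0)) :=
        PySem.Dict.items_foldl_insert_fresh (m0 :: gtl) (fun a => a) (fun _ => m0) m hfresh hmap
      have hkeys : ((m0 :: gtl).foldl (fun m name => m.insert name m0) m).keys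
          = m.keys ++ (m0 :: gtl) := by
        simp only [PySem.Dict.keys, hitems, List.map_append, List.map_map]
        simp [Function.comp_def]
      rw [show List.foldl (fun m name => m.insert name m0) (m.insert m0 m0) gtl
            = List.foldl (fun m name => m.insert name m0) m (m0 :: gtl) from rfl]
      have hknd : ((m0 :: gtl).foldl (fun m name => m.insert name m0) m).keys.Nodup := by
        rw [hkeys]
        exact List.Nodup.append hk hnd.1
          (fun a ha ha' => hdisj a
            (by simp only [List.flatMap_cons, id_eq]; exact List.mem_append.mpr (Or.inl ha')) ha)
      have hkdisj : ∀ x ∈ rest.flatMap id,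
          x ∉ ((m0 :: gtl).foldl (fun m name => m.insert name m0) m).keys := by
        intro x hx
        rw [hkeys]
        intro hmem
        rcases List.mem_append.mp hmem with h | h
        · exact hdisj x
            (by simp only [List.flatMap_cons, id_eq]; exact List.mem_append.mpr (Or.inr hx)) h
        · exact hnd.2.2 x h x hx rfl
      rw [ih _ hnd.2.1 hknd hkdisj, hitems]
      simp [pvRender, List.append_assoc]

-- ---- the combined outer loop: A's BFS grouping vs B's reach-row grouping ----

theorem pvOuter (d : PySem.Dict String (List String)) (U : List String)
    (rch : PySem.Dict String (PySem.Set String))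
    (hdnd : d.keys.Nodup)
    (hD : ∀ u ns, d.get? u = some ns → ∀ v ∈ ns, v ∈ U)
    (hD2 : ∀ u ns, d.get? u = some ns → ∀ v ∈ ns, v ∈ d.keys)
    (hrch : ∀ i ∈ d.keys, ∀ x,
      x ∈ rch.getD i PySem.Set.empty ↔ pvPath d (fun y => y ∈ d.keys) i x) :
    ∀ (l : List String), (∀ k ∈ l, k ∈ U) → (∀ k ∈ l, k ∈ d.keys) →
    ∀ (visA : PySem.Set String) (groups : List (List String))
      (nm : PySem.Dict String String),
      (∀ x, x ∈ visA ↔ x ∈ nm.keys) →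
      nm.keys.Nodup →
      nm.items = pvRender groups →
      (groups.flatMap id).Nodup →
      (∀ g ∈ groups, ∀ x ∈ g, x ∈ visA) →
      (∀ u ∈ visA, ∀ ns, d.get? u = some ns → ∀ v ∈ ns, v ∈ visA) →
      ((l.foldl
          (fun (m : PySem.Dict String String) name =>
            if m.contains name then m
            else
              let group := PySem.List.sorted
                (d.keys.filter (fun x =>
                  PySem.Set.contains (rch.getD name PySem.Set.empty) x && !(m.contains x)))
                (fun x => x)
              group.foldl (fun m member => m.insert member (group.headD "")) m)
          nm).items
        = pvRender (l.foldl
          (fun (st : PySem.Set String × List (List String)) name =>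
            if PySem.Set.contains st.1 name then st
            else
              let r := pvBfs d U st.1 [] [name]
              (r.1, st.2 ++ [PySem.List.sorted r.2 (fun x => x)]))
          (visA, groups)).2) ∧
      (((l.foldl
          (fun (st : PySem.Set String × List (List String)) name =>
            if PySem.Set.contains st.1 name then st
            else
              let r := pvBfs d U st.1 [] [name]
              (r.1, st.2 ++ [PySem.List.sorted r.2 (fun x => x)]))
          (visA, groups)).2).flatMap id).Nodup := by
  intro l
  induction l with
  | nil =>
    intro _hK _hK2 visA groups nm E1 E2 E3 E4 _E5 _E6
    exact ⟨E3, E4⟩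
  | cons k tl ih =>
    intro hK hK2 visA groups nm E1 E2 E3 E4 E5 E6
    have hkk : k ∈ d.keys := hK2 k List.mem_cons_self
    simp only [List.foldl_cons]
    by_cases hcA : PySem.Set.contains visA k = true
    · have hkB : k ∈ nm.keys := (E1 k).mp ((PySem.Set.contains_iff visA k).mp hcA)
      have hcB : nm.contains k = true := (PySem.Dict.contains_iff_mem_keys nm k).mpr hkB
      rw [if_pos hcA, if_pos hcB]
      exact ih (fun k' hk' => hK k' (List.mem_cons_of_mem _ hk'))
        (fun k' hk' => hK2 k' (List.mem_cons_of_mem _ hk')) visA groups nm E1 E2 E3 E4 E5 E6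
    · have hkA : k ∉ visA := fun hm => hcA ((PySem.Set.contains_iff visA k).mpr hm)
      have hkB : k ∉ nm.keys := fun hm => hkA ((E1 k).mpr hm)
      have hcB : ¬ nm.contains k = true := fun h => hkB ((PySem.Dict.contains_iff_mem_keys nm k).mp h)
      rw [if_neg hcA, if_neg hcB]
      obtain ⟨A1, A2, A3⟩ := pvBfs_spec d U visA k hD hkA visA [] [k]
        (by intro x; simp)
        List.nodup_nil
        (by intro x hx; cases hx)
        (by
          intro x hx
          rcases List.mem_cons.mp hx with rfl | h
          · exact ⟨hkA, pvReach.refl, hK x List.mem_cons_self⟩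
          · cases h)
        (by intro u hu; cases hu)
        (Or.inr List.mem_cons_self)
      set r := pvBfs d U visA [] [k] with hr
      -- B's filtered list has the same members as A's group
      set L := d.keys.filter (fun x =>
        PySem.Set.contains (rch.getD k PySem.Set.empty) x && !(nm.contains x)) with hL
      have hLG : ∀ x, x ∈ L ↔ x ∈ r.2 := by
        intro x
        rw [hL, List.mem_filter, Bool.and_eq_true, Bool.not_eq_true', A3]
        constructor
        · rintro ⟨hxk, hxr, hxm⟩
          have hpath := (hrch k hkk x).mp ((PySem.Set.contains_iff _ x).mp hxr)
          have hxA : x ∉ visA := fun hv => by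
            rw [(PySem.Dict.contains_iff_mem_keys nm x).mpr ((E1 x).mp hv)] at hxm
            cases hxm
          exact (pvReach_iff_path d visA k E6 hkA x).mpr ⟨hpath, hxA⟩
        · intro hreach
          have hxk : x ∈ d.keys := pvReach_mem_keys d hkk hD2 hreach
          have hp := (pvReach_iff_path d visA k E6 hkA x).mp hreach
          refine ⟨hxk, (PySem.Set.contains_iff _ x).mpr ((hrch k hkk x).mpr hp.1), ?_⟩
          cases hc : nm.contains x with
          | false => rfl
          | true => exact absurd ((E1 x).mpr ((PySem.Dict.contains_iff_mem_keys nm x).mp hc)) hp.2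
      have hLnd : L.Nodup := List.Nodup.filter _ hdnd
      have hkr : k ∈ r.2 := (A3 k).mpr pvReach.refl
      -- the two sorted lists are equal
      have hperm : (PySem.List.sorted r.2 (fun x => x)).Perm L :=
        (PySem.List.sorted_perm r.2 (fun x => x) false).trans
          ((List.perm_ext_iff_of_nodup A2 hLnd).mpr (fun x => (hLG x).symm))
      have hsortnd : (PySem.List.sorted r.2 (fun x => x)).Nodup :=
        ((PySem.List.sorted_perm r.2 (fun x => x) false).nodup_iff).mpr A2
      have hpairlt : (PySem.List.sorted r.2 (fun x => x)).Pairwise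
          (fun a b => (fun x => x) a < (fun x => x) b) := by
        have hle := PySem.List.sorted_pairwise r.2 (fun x => x)
        have hne : (PySem.List.sorted r.2 (fun x => x)).Pairwise (· ≠ ·) := hsortnd
        exact (hle.and hne).imp (fun h => lt_of_le_of_ne h.1 h.2)
      have hsorted : PySem.List.sorted L (fun x => x) = PySem.List.sorted r.2 (fun x => x) :=
        PySem.List.sorted_eq_of_perm_of_pairwise_lt L (PySem.List.sorted r.2 (fun x => x))
          (fun x => x) hperm hpairlt
      set S := PySem.List.sorted r.2 (fun x => x) with hS
      have hSsub : ∀ x ∈ S, x ∈ r.2 := fun x hx =>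
        (PySem.List.sorted_perm r.2 (fun x => x) false).mem_iff.mp hx
      have hSsup : ∀ x ∈ r.2, x ∈ S := fun x hx =>
        (PySem.List.sorted_perm r.2 (fun x => x) false).mem_iff.mpr hx
      have hreach_notA : ∀ x ∈ r.2, x ∉ visA := by
        intro x hx
        exact pvReach_not_in_V d hkA ((A3 x).mp hx)
      have hfreshB : ∀ a ∈ S, nm.contains a = false := by
        intro a ha
        have hnk : a ∉ nm.keys := fun hk' => hreach_notA a (hSsub a ha) ((E1 a).mpr hk')
        cases hc : nm.contains a with
        | false => rfl
        | true => exact absurd ((PySem.Dict.contains_iff_mem_keys nm a).mp hc) hnk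
      have hSmap : (List.map (fun a => a) S).Nodup := by simpa using hsortnd
      obtain ⟨m0, stl, hSc⟩ : ∃ m0 stl, S = m0 :: stl := by
        cases hSc : S with
        | nil => rw [hSc] at hSsup; cases hSsup k hkr
        | cons a b => exact ⟨a, b, rfl⟩
      have hhead : S.headD "" = m0 := by rw [hSc]; rfl
      rw [hsorted, hhead]
      have hBitems : (S.foldl (fun m member => m.insert member m0) nm).items
          = nm.items ++ S.map (fun a => (a, m0)) :=
        PySem.Dict.items_foldl_insert_fresh S (fun a => a) (fun _ => m0) nm hfreshB hSmap
      have hBkeys : (S.foldl (fun m member => m.insert member m0) nm).keys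
          = nm.keys ++ S := by
        simp only [PySem.Dict.keys, hBitems, List.map_append, List.map_map]
        simp [Function.comp_def]
      refine ih (fun k' hk' => hK k' (List.mem_cons_of_mem _ hk'))
        (fun k' hk' => hK2 k' (List.mem_cons_of_mem _ hk'))
        r.1 (groups ++ [S]) (S.foldl (fun m member => m.insert member m0) nm)
        ?_ ?_ ?_ ?_ ?_ ?_
      · intro x
        rw [A1, hBkeys, List.mem_append]
        constructor
        · rintro (h | h)
          · exact Or.inl ((E1 x).mp h)
          · exact Or.inr (hSsup x h)
        · rintro (h | h)
          · exact Or.inl ((E1 x).mpr h)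
          · exact Or.inr (hSsub x h)
      · rw [hBkeys]
        exact List.Nodup.append E2 hsortnd
          (fun a ha ha' => hreach_notA a (hSsub a ha') ((E1 a).mpr ha))
      · rw [hBitems, E3]
        simp only [pvRender, List.flatMap_append, List.flatMap_cons, List.flatMap_nil,
          List.append_nil]
        rw [hSc]
      · simp only [List.flatMap_append, List.flatMap_cons, List.flatMap_nil, List.append_nil, id_eq]
        have hflat : ∀ a ∈ groups.flatMap id, a ∈ visA := by
          intro a ha
          obtain ⟨g, hg, hag⟩ := List.mem_flatMap.mp ha
          exact E5 g hg a (by simpa using hag)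
        exact List.Nodup.append E4 hsortnd
          (fun a ha ha' => hreach_notA a (hSsub a ha') (hflat a ha))
      · intro g hg x hx
        rcases List.mem_append.mp hg with h | h
        · exact (A1 x).mpr (Or.inl (E5 g h x hx))
        · rcases List.mem_cons.mp h with rfl | h'
          · exact (A1 x).mpr (Or.inr (hSsub x hx))
          · cases h'
      · intro u hu ns hg v hv
        rcases (A1 u).mp hu with h | h
        · exact (A1 v).mpr (Or.inl (E6 u h ns hg v hv))
        · by_cases hvA : v ∈ visA
          · exact (A1 v).mpr (Or.inl hvA)
          · exact (A1 v).mpr (Or.inr ((A3 v).mpr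
              (pvReach.step ((A3 u).mp h) hg hv hvA)))

-- ===== VERDICT (by name: the statements are the Claim_ definitions above) =====
theorem name_mapping_spec : Claim_equal_name_mapping := by
  intro conn _hdom hpre
  unfold Spec_name_mapping
  obtain ⟨h1, h2⟩ := pvOuter (pvToDict conn) (pvUniv conn) (pvWarshall (pvToDict conn))
    (pvToDict_keys_nodup conn)
    (pvToDict_hD conn) (pvToDict_hD2 conn hpre)
    (pvWarshall_spec (pvToDict conn) (pvToDict_keys_nodup conn) (pvToDict_hD2 conn hpre))
    (pvToDict conn).keys (pvToDict_hK conn) (fun k hk => hk)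
    PySem.Set.empty [] PySem.Dict.empty
    (by intro x; simp [PySem.Set.empty, PySem.Dict.empty, PySem.Dict.keys])
    List.nodup_nil
    rfl
    (by simp)
    (fun g hg => by cases hg)
    (fun u hu => by cases hu)
  simp only [name_mapping, name_mapping_alt]
  rw [pvBuildMap _ PySem.Dict.empty h2 List.nodup_nil (fun x _ hx => by cases hx), h1]
  rfl
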